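-- pv_equiv track=rewrite | github.com/naimah404/DySCo_Epilepsy_Analysis | dissertation_code/figures/boxplots/generate_three_condition_boxplots.py | condition_label_en
-- ===== SOURCE A (Python) =====
-- VIDEO_BLOCKS = [(0, 111), (150, 261)]
--
-- WAIT_BLOCKS  = [(111, 150), (261, 296)]
--
-- HALF_WIN     = 10
--
-- def condition_label_en(i):
--     centre = i + HALF_WIN
--     for s, e in VIDEO_BLOCKS:
--         if s <= centre < e:
--             return "video"
--     for s, e in WAIT_BLOCKS:
--         if s <= centre < e:
--             return "wait"
--     return None
-- ===== SOURCE B (Python) =====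
-- from bisect import bisect_right
--
-- _BOUNDS = [0, 111, 150, 261, 296]
-- _LABELS = [None, "video", "wait", "video", "wait", None]
--
-- def condition_label_en(i):
--     centre = i + 10
--     return _LABELS[bisect_right(_BOUNDS, centre)]
-- ===== Notes on version B (the rewrite author's own statement) =====
-- stated objective: alternative
-- what changed: Replaces the two linear scans over VIDEO_BLOCKS/WAIT_BLOCKS with one binary-search (bisect_right) lookup into a precomputed boundary table with a parallel label list.
import Mathlib
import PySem

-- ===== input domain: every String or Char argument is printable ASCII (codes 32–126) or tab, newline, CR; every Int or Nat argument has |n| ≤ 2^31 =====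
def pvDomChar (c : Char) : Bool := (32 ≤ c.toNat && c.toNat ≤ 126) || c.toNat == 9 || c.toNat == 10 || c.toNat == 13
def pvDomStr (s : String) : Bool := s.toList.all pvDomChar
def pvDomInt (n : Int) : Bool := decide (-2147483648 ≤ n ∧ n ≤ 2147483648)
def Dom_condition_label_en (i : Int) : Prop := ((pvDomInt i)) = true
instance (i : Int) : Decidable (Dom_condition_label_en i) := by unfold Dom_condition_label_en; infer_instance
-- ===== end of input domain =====

-- B replaces the two linear block scans with a bisect_right lookup into a
-- precomputed boundary table with a parallel label list (alternative decomposition).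


-- ===== PORT A =====
def pvVIDEO_BLOCKS : List (Int × Int) := [(0, 111), (150, 261)]
def pvWAIT_BLOCKS : List (Int × Int) := [(111, 150), (261, 296)]
def pvHALF_WIN : Int := 10

-- the 'for … return label' loop over a block list
def pvScanBlocks (label : String) (centre : Int) : List (Int × Int) → Option String
  | [] => none
  | (s, e) :: rest =>
      if s ≤ centre ∧ centre < e then some label else pvScanBlocks label centre rest

def condition_label_en (i : Int) : Option String :=
  let centre := i + pvHALF_WIN
  match pvScanBlocks "video" centre pvVIDEO_BLOCKS with
  | some v => some v
  | none =>
      match pvScanBlocks "wait" centre pvWAIT_BLOCKS with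
      | some v => some v
      | none => none

-- ===== PORT B =====
def pvBOUNDS : List Int := [0, 111, 150, 261, 296]
def pvLABELS : List (Option String) := [none, some "video", some "wait", some "video", some "wait", none]

-- bisect.bisect_right on a sorted list = number of elements ≤ x
def pvBisectRight (xs : List Int) (x : Int) : Nat := xs.countP (fun b => b ≤ x)

def condition_label_en_alt (i : Int) : Option String :=
  let centre := i + 10
  pvLABELS.getD (pvBisectRight pvBOUNDS centre) none

-- ===== PRECONDITION & SPEC =====
def Spec_condition_label_en (i : Int) (out : Option String) : Prop := out = condition_label_en_alt i
instance (i : Int) (out : Option String) : Decidable (Spec_condition_label_en i out) := by unfold Spec_condition_label_en; infer_instance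

-- ===== CLAIM (what is proved, stated in full; the proofs are below) =====
def Claim_equal_condition_label_en : Prop := ∀ (i : Int), Dom_condition_label_en i → Spec_condition_label_en i (condition_label_en i)

-- ===== LEMMAS AND PROOFS =====

-- ===== VERDICT (by name: the statement is the Claim_ definition above) =====
-- pointwise agreement, by case analysis on which of the six bins centre = i+10 falls in
theorem pv_agree (i : Int) : condition_label_en i = condition_label_en_alt i := by
  unfold condition_label_en condition_label_en_alt
  unfold pvVIDEO_BLOCKS pvWAIT_BLOCKS pvHALF_WIN pvBisectRight pvBOUNDS pvLABELS
  by_cases h0 : i + 10 < 0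
  · simp [pvScanBlocks, show ¬(0 ≤ i + 10) by omega, show ¬(111 ≤ i + 10) by omega,
      show ¬(150 ≤ i + 10) by omega, show ¬(261 ≤ i + 10) by omega,
      show ¬(296 ≤ i + 10) by omega, show ¬(0 ≤ i + 10 ∧ i + 10 < 111) by omega,
      show ¬(150 ≤ i + 10 ∧ i + 10 < 261) by omega,
      show ¬(111 ≤ i + 10 ∧ i + 10 < 150) by omega,
      show ¬(261 ≤ i + 10 ∧ i + 10 < 296) by omega]
  · by_cases h1 : i + 10 < 111
    · simp [pvScanBlocks, show (0 ≤ i + 10 ∧ i + 10 < 111) by omega, show (0 ≤ i + 10) by omega,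
        show ¬(111 ≤ i + 10) by omega, show ¬(150 ≤ i + 10) by omega,
        show ¬(261 ≤ i + 10) by omega, show ¬(296 ≤ i + 10) by omega]
    · by_cases h2 : i + 10 < 150
      · simp [pvScanBlocks, show ¬(0 ≤ i + 10 ∧ i + 10 < 111) by omega, show (0 ≤ i + 10) by omega,
          show (111 ≤ i + 10) by omega, show ¬(150 ≤ i + 10) by omega,
          show ¬(261 ≤ i + 10) by omega, show ¬(296 ≤ i + 10) by omega,
          show ¬(150 ≤ i + 10 ∧ i + 10 < 261) by omega,
          show (111 ≤ i + 10 ∧ i + 10 < 150) by omega, h1]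
      · by_cases h3 : i + 10 < 261
        · simp [pvScanBlocks, show ¬(0 ≤ i + 10 ∧ i + 10 < 111) by omega, show (0 ≤ i + 10) by omega,
            show (111 ≤ i + 10) by omega, show (150 ≤ i + 10) by omega,
            show ¬(261 ≤ i + 10) by omega, show ¬(296 ≤ i + 10) by omega,
            show (150 ≤ i + 10 ∧ i + 10 < 261) by omega]
        · by_cases h4 : i + 10 < 296
          · simp [pvScanBlocks, show ¬(0 ≤ i + 10 ∧ i + 10 < 111) by omega, show (0 ≤ i + 10) by omega,
              show (111 ≤ i + 10) by omega, show (150 ≤ i + 10) by omega,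
              show (261 ≤ i + 10) by omega, show ¬(296 ≤ i + 10) by omega,
              show ¬(150 ≤ i + 10 ∧ i + 10 < 261) by omega,
              show ¬(111 ≤ i + 10 ∧ i + 10 < 150) by omega,
              show (261 ≤ i + 10 ∧ i + 10 < 296) by omega, h1, h3]
          · simp [pvScanBlocks, show ¬(0 ≤ i + 10 ∧ i + 10 < 111) by omega, show (0 ≤ i + 10) by omega,
              show (111 ≤ i + 10) by omega, show (150 ≤ i + 10) by omega,
              show (261 ≤ i + 10) by omega, show (296 ≤ i + 10) by omega,
              show ¬(150 ≤ i + 10 ∧ i + 10 < 261) by omega,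
              show ¬(111 ≤ i + 10 ∧ i + 10 < 150) by omega,
              show ¬(261 ≤ i + 10 ∧ i + 10 < 296) by omega, h1, h2, h3, h4]

theorem condition_label_en_spec : Claim_equal_condition_label_en := by
  intro i _
  exact pv_agree i
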